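-- pv_equiv track=rewrite | github.com/dth2701/Leetcode-Tracking | TIP102/Unit 2: Dictionaries/s2Advanced.py | is_authentic_collection
-- ===== SOURCE A (Python) =====
-- def is_authentic_collection(art_pieces):
--
--     n = len(art_pieces)
--     if n == 0: return False
--
--     # Find the highest number in the collection
--     max_num = max(art_pieces)
--     if max_num + 1 != n: return False
--
--     counter = {}
--
--     for num in art_pieces:
--         counter[num] = 1 + counter.get(num , 0)
--
--
--     # Check values 1 to n-1 occur exactly once
--     for i in range(1, max_num):
--         if counter.get(i, 0) != 1:
--             return False
--
--     # Check that value n occurs exactly twice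
--     if counter.get(max_num, 0) != 2:
--         return False
--
--     return True
-- ===== SOURCE B (Python) =====
-- def is_authentic_collection(art_pieces):
--     if not art_pieces:
--         return False
--     max_num = max(art_pieces)
--     if max_num + 1 != len(art_pieces):
--         return False
--     return sorted(art_pieces) == list(range(1, max_num)) + [max_num, max_num]
-- ===== Notes on version B (the rewrite author's own statement) =====
-- stated objective: simpler
-- what changed: Replaces the counter dict and the range-verification loop with a single sort-and-compare against the expected multiset [1..max-1, max, max].
import Mathlib
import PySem

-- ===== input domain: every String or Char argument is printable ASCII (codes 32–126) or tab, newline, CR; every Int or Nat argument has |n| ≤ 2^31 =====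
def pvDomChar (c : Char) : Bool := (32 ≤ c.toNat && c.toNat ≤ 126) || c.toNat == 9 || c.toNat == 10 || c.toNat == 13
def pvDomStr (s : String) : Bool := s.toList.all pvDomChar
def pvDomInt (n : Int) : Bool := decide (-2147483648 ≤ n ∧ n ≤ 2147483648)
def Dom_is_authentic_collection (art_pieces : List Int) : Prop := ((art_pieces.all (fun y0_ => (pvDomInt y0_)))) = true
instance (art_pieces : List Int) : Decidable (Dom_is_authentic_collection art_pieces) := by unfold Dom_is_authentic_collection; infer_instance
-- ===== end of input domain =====

-- B replaces A's counter dict and verification loop by a single sort-and-compare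
-- against the expected list [1..max-1, max, max] (objective: simpler).

-- ===== PORT A =====
def is_authentic_collection (art_pieces : List Int) : Bool :=
  let n : Int := art_pieces.length
  if n == 0 then false
  else
    match PySem.List.max? art_pieces (fun x => x) with
    | none => false          -- unreachable: the list is nonempty here
    | some max_num =>
      if max_num + 1 != n then false
      else
        let counter := art_pieces.foldl
          (fun d num => d.insert num (1 + d.getD num 0)) (PySem.Dict.empty : PySem.Dict Int Int)
        -- for i in range(1, max_num): early return False ⇒ List.all
        if (PySem.List.pyRange 1 max_num 1).all (fun i => counter.getD i 0 == 1) then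
          if counter.getD max_num 0 != 2 then false
          else true
        else false

-- ===== PORT B =====
def is_authentic_collection_alt (art_pieces : List Int) : Bool :=
  if art_pieces == [] then false
  else
    match PySem.List.max? art_pieces (fun x => x) with
    | none => false          -- unreachable: the list is nonempty here
    | some max_num =>
      if max_num + 1 != (art_pieces.length : Int) then false
      else
        PySem.List.sorted art_pieces (fun x => x) false
          == PySem.List.pyRange 1 max_num 1 ++ [max_num, max_num]

-- ===== PRECONDITION & SPEC =====
def Spec_is_authentic_collection (art_pieces : List Int) (out : Bool) : Prop := out = is_authentic_collection_alt art_pieces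
instance (art_pieces : List Int) (out : Bool) : Decidable (Spec_is_authentic_collection art_pieces out) := by unfold Spec_is_authentic_collection; infer_instance

-- ===== CLAIM (what is proved, stated in full; the proofs are below) =====
def Claim_equal_is_authentic_collection : Prop := ∀ (art_pieces : List Int), Dom_is_authentic_collection art_pieces → Spec_is_authentic_collection art_pieces (is_authentic_collection art_pieces)

-- ===== LEMMAS AND PROOFS =====

-- A's hand-built counter is Counter(xs): getD k 0 = count k
lemma counter_getD (xs : List Int) (v : Int) :
    (xs.foldl (fun d num => d.insert num (1 + d.getD num 0))
      (PySem.Dict.empty : PySem.Dict Int Int)).getD v 0 = (xs.count v : Int) := by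
  have h : (fun (d : PySem.Dict Int Int) num => d.insert num (1 + d.getD num 0))
      = (fun (d : PySem.Dict Int Int) num => d.insert num (d.getD num 0 + 1)) := by
    funext d num; rw [Int.add_comm]
  rw [h, PySem.Dict.foldl_insert_getD_add_one_eq_counter, PySem.Dict.getD_counter]

-- the expected list is weakly sorted
lemma expected_pairwise (m : Int) :
    (PySem.List.pyRange 1 m 1 ++ [m, m]).Pairwise (· ≤ ·) := by
  rw [List.pairwise_append]
  refine ⟨(PySem.List.pairwise_lt_pyRange_one 1 m).imp (fun h => le_of_lt h), by simp, ?_⟩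
  intro a ha b hb
  have h1 := (PySem.List.mem_pyRange_one.mp ha).2
  have hb' : b = m := by simpa using hb
  omega

-- multiset characterisation: A's count conditions ⇔ permutation of the expected list
lemma counts_iff_perm (xs : List Int) (m : Int) (hlen : (xs.length : Int) = m + 1) :
    ((∀ i ∈ PySem.List.pyRange 1 m 1, xs.count i = 1) ∧ xs.count m = 2)
      ↔ xs.Perm (PySem.List.pyRange 1 m 1 ++ [m, m]) := by
  constructor
  · rintro ⟨h1, h2⟩
    have hm1 : 1 ≤ m := by
      have := List.count_le_length (l := xs) (a := m)
      omega
    have hsub : (PySem.List.pyRange 1 m 1 ++ [m, m]).Subperm xs := by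
      rw [List.subperm_ext_iff]
      intro a ha
      rw [List.mem_append] at ha
      rcases ha with ha | ha
      · have halt : a < m := (PySem.List.mem_pyRange_one.mp ha).2
        have : (PySem.List.pyRange 1 m 1 ++ [m, m]).count a
            = (PySem.List.pyRange 1 m 1).count a + 0 := by
          rw [List.count_append]
          congr 1
          simp [List.count_cons]
          omega
        rw [this, List.count_eq_one_of_mem (PySem.List.nodup_pyRange_one 1 m) ha, h1 a ha]
      · have ham : a = m := by simpa using ha
        subst ham
        have hnr : a ∉ PySem.List.pyRange 1 a 1 := by
          intro h; exact absurd (PySem.List.mem_pyRange_one.mp h).2 (lt_irrefl a)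
        rw [List.count_append, List.count_eq_zero.mpr hnr, h2]
        simp
    have hlength : xs.length ≤ (PySem.List.pyRange 1 m 1 ++ [m, m]).length := by
      rw [List.length_append, PySem.List.length_pyRange_one]
      simp only [List.length_cons, List.length_nil]
      omega
    exact (List.Subperm.perm_of_length_le hsub hlength).symm
  · intro hp
    constructor
    · intro i hi
      rw [hp.count_eq, List.count_append,
        List.count_eq_one_of_mem (PySem.List.nodup_pyRange_one 1 m) hi]
      have : i < m := (PySem.List.mem_pyRange_one.mp hi).2
      simp [List.count_cons]
      omega
    · have hnr : m ∉ PySem.List.pyRange 1 m 1 := by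
        intro h; exact absurd (PySem.List.mem_pyRange_one.mp h).2 (lt_irrefl m)
      rw [hp.count_eq, List.count_append, List.count_eq_zero.mpr hnr]
      simp

-- ===== VERDICT (by name: the statement is the Claim_ definition above) =====
theorem is_authentic_collection_spec : Claim_equal_is_authentic_collection := by
  intro xs _
  unfold Spec_is_authentic_collection is_authentic_collection is_authentic_collection_alt
  by_cases hnil : xs = []
  · subst hnil; rfl
  have hlen0 : ((xs.length : Int) == 0) = false := by
    simp [hnil]
  have hne : (xs == []) = false := by simp [hnil]
  simp only [hlen0, hne, Bool.false_eq_true, if_false]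
  cases hmax : PySem.List.max? xs (fun x => x) with
  | none => rfl
  | some m =>
    by_cases hguard : m + 1 ≠ (xs.length : Int)
    · simp [hguard]
    · rw [not_not] at hguard
      simp only [hguard, bne_self_eq_false, Bool.false_eq_true, if_false]
      have hlen : (xs.length : Int) = m + 1 := hguard.symm
      -- left side in terms of counts
      have hiff := counts_iff_perm xs m hlen
      have hsortedE : PySem.List.sorted (PySem.List.pyRange 1 m 1 ++ [m, m]) (fun x => x) false
          = PySem.List.pyRange 1 m 1 ++ [m, m] :=
        PySem.List.sorted_eq_self_of_pairwise _ _ (by simpa using expected_pairwise m)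
      have hB : ((PySem.List.sorted xs (fun x => x) false
            == PySem.List.pyRange 1 m 1 ++ [m, m]) = true)
          ↔ xs.Perm (PySem.List.pyRange 1 m 1 ++ [m, m]) := by
        rw [beq_iff_eq]
        constructor
        · intro h
          exact (PySem.List.sorted_id_eq_sorted_id_iff_perm xs _).mp (h.trans hsortedE.symm)
        · intro h
          exact ((PySem.List.sorted_id_eq_sorted_id_iff_perm xs _).mpr h).trans hsortedE
      rw [Bool.eq_iff_iff, hB, ← hiff]
      simp only [counter_getD]
      split_ifs with h1 h2
      · -- range check passed but count of max is not 2
        simp only [List.all_eq_true] at h1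
        simp only [bne_iff_ne, ne_eq] at h2
        simp only [false_iff, not_and]
        intro _ hc
        exact h2 (by exact_mod_cast hc)
      · -- both checks passed
        simp only [List.all_eq_true] at h1
        simp only [bne_iff_ne, ne_eq, not_not] at h2
        simp only [true_iff]
        exact ⟨fun i hi => by have := h1 i hi; simp at this; exact_mod_cast this,
               by exact_mod_cast h2⟩
      · -- range check failed
        simp only [List.all_eq_true, not_forall] at h1
        simp only [false_iff, not_and]
        intro hall _
        obtain ⟨i, hi, hci⟩ := h1
        exact hci (by simp [hall i hi])
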